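-- pv_equiv track=rewrite | github.com/TakenoSite/INTERNET-DEVICE-SEARCH-ENGINE | utils/args.py | args_paser
-- ===== SOURCE A (Python) =====
-- def args_paser(value:str, opt=False):
--     data = value.split(" ")
--     data = [i for i in data if "" != i]
--
--     result = {}
--     current_option = None
--
--     for item in data:
--         if item.startswith('-'):
--             if item.startswith("--"):
--                 if opt:
--                     current_option = item[2:]
--                 else:
--                     current_option = item
--             else:
--                 if opt:
--                     current_option = item[1:]
--                 else:
--                     current_option = item
--
--             result[current_option] = []
--         else:
--             try:
--                 result[current_option].append(item)
--             except:
--                 return None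
--
--     return result
-- ===== SOURCE B (Python) =====
-- def args_paser(value: str, opt=False):
--     toks = [t for t in value.split(" ") if t != ""]
--     if toks and not toks[0].startswith("-"):
--         return None
--     result = {}
--     rest = toks
--     while rest:
--         head, rest = rest[0], rest[1:]
--         vals = []
--         while rest and not rest[0].startswith("-"):
--             vals.append(rest[0])
--             rest = rest[1:]
--         if opt:
--             key = head[2:] if head.startswith("--") else head[1:]
--         else:
--             key = head
--         result[key] = vals
--     return result
-- ===== Notes on version B (the rewrite author's own statement) =====
-- stated objective: alternative
-- what changed: Replaces A's single pass with a mutable current-option cell and per-item append (with try/except for a leading value) by a grouping parse: after an early None check on the first token, each option token takes the whole run of value tokens up to the next option as one slice.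
import Mathlib
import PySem

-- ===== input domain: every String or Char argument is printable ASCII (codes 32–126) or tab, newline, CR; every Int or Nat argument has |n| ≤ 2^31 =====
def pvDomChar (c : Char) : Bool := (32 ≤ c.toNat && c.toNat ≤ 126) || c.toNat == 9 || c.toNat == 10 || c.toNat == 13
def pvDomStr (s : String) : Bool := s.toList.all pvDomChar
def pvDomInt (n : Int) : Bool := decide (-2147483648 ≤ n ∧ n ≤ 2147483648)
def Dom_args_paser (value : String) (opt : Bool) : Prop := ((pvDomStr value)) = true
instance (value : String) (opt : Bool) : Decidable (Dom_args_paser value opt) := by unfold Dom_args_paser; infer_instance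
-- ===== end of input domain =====

-- B replaces A's single pass with a mutable current-option cell by a grouping parse (each option
-- takes the run of value tokens up to the next option); return values agree everywhere (alternative).

-- ===== PORT A =====
-- A's for-loop: state = (result dict, current_option); `try result[cur].append(item) except: return None`
-- is the `none` branches (lookup of the None key, or a missing key, is exactly Python's KeyError).
def argsLoopA (opt : Bool) : List String → PySem.Dict String (List String) → Option String →
    Option (PySem.Dict String (List String))
  | [], result, _ => some result
  | item :: rest, result, cur =>
    if PySem.Str.startswith item "-" then
      let k :=
        if PySem.Str.startswith item "--" then
          (if opt then PySem.Str.slice item (some 2) none else item)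
        else
          (if opt then PySem.Str.slice item (some 1) none else item)
      argsLoopA opt rest (result.insert k []) (some k)
    else
      match cur with
      | none => none
      | some k =>
        match result.get? k with
        | none => none
        | some vs => argsLoopA opt rest (result.insert k (vs ++ [item])) (some k)

-- value.split(" "): the separator is the non-empty literal " ", so split? is always `some`.
def args_paser (value : String) (opt : Bool) : Option (List (String × List String)) :=
  let data := (PySem.Str.split? value " ").getD []
  let data := data.filter (fun i => "" != i)
  match argsLoopA opt data PySem.Dict.empty none with
  | none => none
  | some result => some result.items

-- ===== PORT B =====
def isOptTok (t : String) : Bool := PySem.Str.startswith t "-"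

def keyB (opt : Bool) (t : String) : String :=
  if opt then
    (if PySem.Str.startswith t "--" then PySem.Str.slice t (some 2) none
     else PySem.Str.slice t (some 1) none)
  else t

-- inner while = takeWhile/dropWhile of the non-option run
def groupB (opt : Bool) : List String → PySem.Dict String (List String) →
    PySem.Dict String (List String)
  | [], d => d
  | t :: rest, d =>
    let vals := rest.takeWhile (fun s => !isOptTok s)
    let rest' := rest.dropWhile (fun s => !isOptTok s)
    groupB opt rest' (d.insert (keyB opt t) vals)
termination_by l => l.length
decreasing_by
  simp only [List.length_cons]
  exact Nat.lt_succ_of_le (List.length_dropWhile_le _ _)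

def args_paser_alt (value : String) (opt : Bool) : Option (List (String × List String)) :=
  let toks := ((PySem.Str.split? value " ").getD []).filter (fun t => t != "")
  match toks with
  | [] => some []
  | t :: rest =>
    if isOptTok t then some ((groupB opt (t :: rest) PySem.Dict.empty).items)
    else none

-- ===== PRECONDITION & SPEC =====
def Spec_args_paser (value : String) (opt : Bool) (out : Option (List (String × List String))) : Prop := out = args_paser_alt value opt
instance (value : String) (opt : Bool) (out : Option (List (String × List String))) : Decidable (Spec_args_paser value opt out) := by unfold Spec_args_paser; infer_instance

-- ===== CLAIM (what is proved, stated in full; the proofs are below) =====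
def Claim_equal_args_paser : Prop := ∀ (value : String) (opt : Bool), Dom_args_paser value opt → Spec_args_paser value opt (args_paser value opt)

-- ===== LEMMAS AND PROOFS =====

-- A run of non-option tokens is appended one by one onto the current key's list.
theorem argsLoopA_run (opt : Bool) (vals : List String)
    (h : ∀ v ∈ vals, isOptTok v = false) :
    ∀ (rest : List String) (d : PySem.Dict String (List String)) (k : String)
      (acc : List String),
      argsLoopA opt (vals ++ rest) (d.insert k acc) (some k) =
        argsLoopA opt rest (d.insert k (acc ++ vals)) (some k) := by
  induction vals with
  | nil => intro rest d k acc; simp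
  | cons v vs ih =>
    intro rest d k acc
    have hv : isOptTok v = false := h v (by simp)
    simp only [List.cons_append, argsLoopA]
    rw [if_neg (by simpa [isOptTok] using hv)]
    simp only [PySem.Dict.get?_insert_self, PySem.Dict.insert_insert_self]
    rw [ih (fun x hx => h x (by simp [hx])) rest d k (acc ++ [v])]
    simp

-- Main invariant: starting at an option token, A's pass builds exactly B's grouping.
theorem argsLoopA_eq_groupB (opt : Bool) :
    ∀ (n : Nat) (t : String) (rest : List String)
      (d : PySem.Dict String (List String)) (cur : Option String),
      rest.length ≤ n → isOptTok t = true →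
      argsLoopA opt (t :: rest) d cur = some (groupB opt (t :: rest) d) := by
  intro n
  induction n with
  | zero =>
    intro t rest d cur hlen ht
    have hnil : rest = [] := List.eq_nil_of_length_eq_zero (Nat.le_zero.mp hlen)
    subst hnil
    simp only [argsLoopA]
    rw [if_pos (by simpa [isOptTok] using ht)]
    simp only [groupB, List.takeWhile_nil, List.dropWhile_nil]
    by_cases h2 : PySem.Str.startswith t "--" <;> by_cases ho : opt <;>
      simp [keyB, ho] <;> rfl
  | succ m ih =>
    intro t rest d cur hlen ht
    simp only [argsLoopA]
    rw [if_pos (by simpa [isOptTok] using ht)]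
    have hkey :
        (if PySem.Str.startswith t "--" then
            (if opt then PySem.Str.slice t (some 2) none else t)
          else (if opt then PySem.Str.slice t (some 1) none else t)) = keyB opt t := by
      by_cases h2 : PySem.Str.startswith t "--" <;> by_cases ho : opt <;> simp [keyB, ho]
    rw [hkey]
    have hsplit := List.takeWhile_append_dropWhile (p := fun s => !isOptTok s) (l := rest)
    set vals := rest.takeWhile (fun s => !isOptTok s) with hvals
    set rest' := rest.dropWhile (fun s => !isOptTok s) with hrest'
    have hvalsOpt : ∀ v ∈ vals, isOptTok v = false := by
      intro v hv
      have := List.mem_takeWhile_imp hv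
      simpa using this
    have hrun := argsLoopA_run opt vals hvalsOpt rest' d (keyB opt t) []
    rw [hsplit] at hrun
    have hgB : groupB opt (t :: rest) d = groupB opt rest' (d.insert (keyB opt t) vals) := by
      conv_lhs => rw [groupB]
    rw [hrun, hgB]
    simp only [List.nil_append]
    match hr : rest' with
    | [] => simp [argsLoopA, groupB]
    | u :: rest'' =>
      have hu : isOptTok u = true := by
        have hne : rest.dropWhile (fun s => !isOptTok s) ≠ [] := by
          rw [← hrest']; simp
        have := List.head_dropWhile_not (p := fun s => !isOptTok s) (l := rest) (w := hne)
        have hheads : (rest.dropWhile (fun s => !isOptTok s)).head hne = u := by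
          simp [← hrest']
        rw [hheads] at this
        simpa using this
      have hlen' : rest''.length ≤ m := by
        have h1 : (u :: rest'').length ≤ rest.length := by
          rw [hrest']; exact List.length_dropWhile_le _ _
        simp only [List.length_cons] at h1
        omega
      exact ih u rest'' (d.insert (keyB opt t) vals) (some (keyB opt t)) hlen' hu

-- ===== VERDICT (by name: the statement is the Claim_ definition above) =====
theorem args_paser_spec : Claim_equal_args_paser := by
  intro value opt _
  unfold Spec_args_paser args_paser args_paser_alt
  have hfeq : ((PySem.Str.split? value " ").getD []).filter (fun i => "" != i) =
      ((PySem.Str.split? value " ").getD []).filter (fun t => t != "") := by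
    apply List.filter_congr
    intro x _
    simp [bne, BEq.beq, eq_comm]
  dsimp only
  rw [hfeq]
  match htoks : ((PySem.Str.split? value " ").getD []).filter (fun t => t != "") with
  | [] => simp [argsLoopA, PySem.Dict.empty]
  | t :: rest =>
    by_cases ht : isOptTok t
    · rw [argsLoopA_eq_groupB opt rest.length t rest PySem.Dict.empty none le_rfl ht]
      simp [ht]
    · have ht' : isOptTok t = false := by simpa using ht
      simp only [argsLoopA]
      rw [if_neg (by simpa [isOptTok] using ht')]
      simp [ht']
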